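-- pv_equiv track=rewrite | github.com/llucasls/trybe-exercises | 4.computer-science/bloco37/37.2/exercicio1.py | max_stability_time
-- ===== SOURCE A (Python) =====
-- def max_stability_time(sample):
--     streak = 0
--     record = 0
--     for value in sample:
--         if value == 1:
--             streak += 1
--         else:
--             streak = 0
--         record = max(record, streak)
--     return record
-- ===== SOURCE B (Python) =====
-- def max_stability_time(sample):
--     # run-skipping scan: jump over maximal runs of 1s instead of a per-element streak accumulator
--     best = 0
--     i = 0
--     n = len(sample)
--     while i < n:
--         if sample[i] != 1:
--             i += 1
--         else:
--             j = i + 1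
--             while j < n and sample[j] == 1:
--                 j += 1
--             if j - i > best:
--                 best = j - i
--             i = j
--     return best
-- ===== Notes on version B (the rewrite author's own statement) =====
-- stated objective: alternative
-- what changed: Replaces the per-element streak/record accumulator with an outer scan that, at each run of 1s, counts the whole maximal run at once and jumps past it, taking the max of run lengths.
import Mathlib
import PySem

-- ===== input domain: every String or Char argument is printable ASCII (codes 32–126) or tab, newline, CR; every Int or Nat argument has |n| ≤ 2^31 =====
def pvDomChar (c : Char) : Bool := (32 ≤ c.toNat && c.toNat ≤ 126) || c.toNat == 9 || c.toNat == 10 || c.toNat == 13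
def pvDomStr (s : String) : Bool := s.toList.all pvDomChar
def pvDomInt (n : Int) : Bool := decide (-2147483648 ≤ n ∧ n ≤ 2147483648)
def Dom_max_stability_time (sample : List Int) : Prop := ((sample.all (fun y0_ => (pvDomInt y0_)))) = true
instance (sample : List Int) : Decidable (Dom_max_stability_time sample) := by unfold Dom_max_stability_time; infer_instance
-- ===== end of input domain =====

-- B replaces A's per-element streak/record accumulator by a run-skipping scan (count each
-- maximal run of 1s at once, keep the max run length); alternative decomposition, same cost.

-- ===== PORT A =====
def pvStepA (p : Int × Int) (value : Int) : Int × Int :=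
  let streak := if value == 1 then p.1 + 1 else (0 : Int)
  (streak, max p.2 streak)

def max_stability_time (sample : List Int) : Int :=
  (sample.foldl pvStepA (0, 0)).2

-- ===== PORT B =====
-- the outer while-loop of Source B: `best` is the accumulator, a run of 1s is counted
-- with takeWhile and jumped over with dropWhile (= the inner j-loop)
def pvAltGo : Int → List Int → Int
  | best, [] => best
  | best, x :: xs =>
    if x ≠ 1 then pvAltGo best xs
    else
      let run : Int := ((xs.takeWhile (fun v => v == 1)).length : Int) + 1
      pvAltGo (if run > best then run else best) (xs.dropWhile (fun v => v == 1))
termination_by _ xs => xs.length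
decreasing_by
  · simp
  · have := List.length_dropWhile_le (fun v => (v == 1)) xs
    simp at this ⊢; omega

def max_stability_time_alt (sample : List Int) : Int :=
  pvAltGo 0 sample

-- ===== PRECONDITION & SPEC =====
def Spec_max_stability_time (sample : List Int) (out : Int) : Prop := out = max_stability_time_alt sample
instance (sample : List Int) (out : Int) : Decidable (Spec_max_stability_time sample out) := by unfold Spec_max_stability_time; infer_instance

-- ===== CLAIM (what is proved, stated in full; the proofs are below) =====
def Claim_equal_max_stability_time : Prop := ∀ (sample : List Int), Dom_max_stability_time sample → Spec_max_stability_time sample (max_stability_time sample)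

-- ===== LEMMAS AND PROOFS =====

-- folding A's step over a block of 1s adds the block length to the streak and records it
lemma pv_ones_fold (t : List Int) (h : ∀ a ∈ t, a = 1) :
    ∀ s r : Int, List.foldl pvStepA (s, r) t =
      (s + t.length, if t.length = 0 then r else max r (s + t.length)) := by
  induction t with
  | nil => intro s r; simp
  | cons a t ih =>
    intro s r
    have ha : a = 1 := h a (by simp)
    have h' : ∀ b ∈ t, b = 1 := fun b hb => h b (by simp [hb])
    simp only [List.foldl_cons, pvStepA, ha]
    rw [ih h']
    simp only [List.length_cons, Prod.mk.injEq, beq_self_eq_true, reduceIte]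
    constructor
    · push_cast; ring
    · rcases Nat.eq_zero_or_pos t.length with h0 | h0
      · simp [h0]
      · rw [if_neg (by omega), if_neg (by omega), max_assoc]
        congr 1
        rw [max_eq_right (by omega)]
        push_cast; ring

lemma pv_main (n : Nat) : ∀ xs : List Int, xs.length ≤ n → ∀ r : Int, 0 ≤ r →
    (List.foldl pvStepA (0, r) xs).2 = pvAltGo r xs := by
  induction n with
  | zero =>
    intro xs hlen r _
    have hnil : xs = [] := List.eq_nil_of_length_eq_zero (Nat.le_zero.mp hlen)
    subst hnil; simp [pvAltGo]
  | succ n ih =>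
    intro xs hlen r hr
    match xs, hlen with
    | [], _ => simp [pvAltGo]
    | x :: xs, hlen =>
      by_cases hx : x = 1
      · -- a run of 1s starts here: fold over the whole run, then continue after it
        have htones : ∀ a ∈ xs.takeWhile (fun v => v == 1), a = 1 := by
          intro a hamem
          simpa using List.mem_takeWhile_imp hamem
        have hallones : ∀ a ∈ x :: xs.takeWhile (fun v => v == 1), a = 1 := by
          intro a ha
          rcases List.mem_cons.mp ha with h | h
          · exact h.trans hx
          · exact htones a h
        have hL : (0:Int) ≤ (xs.takeWhile (fun v => v == 1)).length + 1 := by positivity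
        have hbest : (0:Int) ≤ max r (((xs.takeWhile (fun v => v == 1)).length : Int) + 1) :=
          le_max_of_le_left hr
        have hfold : List.foldl pvStepA (0, r) (x :: xs)
            = List.foldl pvStepA
                (((xs.takeWhile (fun v => v == 1)).length : Int) + 1,
                 max r (((xs.takeWhile (fun v => v == 1)).length : Int) + 1))
                (xs.dropWhile (fun v => v == 1)) := by
          conv_lhs => rw [show x :: xs = (x :: xs.takeWhile (fun v => v == 1)) ++ xs.dropWhile (fun v => v == 1) by
            rw [List.cons_append, List.takeWhile_append_dropWhile]]
          rw [List.foldl_append, pv_ones_fold _ hallones 0 r]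
          simp only [List.length_cons]
          rw [if_neg (Nat.succ_ne_zero _)]
          rw [show (0:Int) + ((xs.takeWhile (fun v => v == 1)).length + 1 : Nat)
                = ((xs.takeWhile (fun v => v == 1)).length : Int) + 1 by push_cast; ring]
        have hifmax : (if (((xs.takeWhile (fun v => v == 1)).length : Int) + 1) > r
              then (((xs.takeWhile (fun v => v == 1)).length : Int) + 1) else r)
            = max r (((xs.takeWhile (fun v => v == 1)).length : Int) + 1) := by
          split_ifs with h
          · exact (max_eq_right (by omega)).symm
          · exact (max_eq_left (by omega)).symm
        have haltB : pvAltGo r (x :: xs)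
            = pvAltGo (max r (((xs.takeWhile (fun v => v == 1)).length : Int) + 1))
                (xs.dropWhile (fun v => v == 1)) := by
          rw [pvAltGo]
          simp only [hx, ne_eq, not_true_eq_false, if_false, hifmax]
        rw [hfold, haltB]
        have hdlen : (xs.dropWhile (fun v => v == 1)).length ≤ xs.length :=
          List.length_dropWhile_le _ _
        match hd : xs.dropWhile (fun v => v == 1) with
        | [] => simp [pvAltGo]
        | y :: ys =>
          have hy : ¬ (y == 1) = true := by
            have hne : xs.dropWhile (fun v => v == 1) ≠ [] := by rw [hd]; simp
            have := List.head_dropWhile_not (fun v => v == 1) hne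
            simpa [hd] using this
          have hy' : y ≠ 1 := by simpa using hy
          have hstep : pvStepA
              (((xs.takeWhile (fun v => v == 1)).length : Int) + 1,
               max r (((xs.takeWhile (fun v => v == 1)).length : Int) + 1)) y
              = (0, max r (((xs.takeWhile (fun v => v == 1)).length : Int) + 1)) := by
            simp [pvStepA, hy', max_eq_left hbest]
          rw [List.foldl_cons, hstep, pvAltGo]
          simp only [hy', ne_eq, not_false_eq_true, if_true]
          exact ih ys (by rw [hd] at hdlen; simp at hdlen; simp at hlen; omega)
            _ hbest
      · -- not a 1: the streak resets and the record is unchanged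
        have hx' : ¬ (x == 1) = true := by simpa using hx
        have hstep : pvStepA (0, r) x = (0, r) := by
          simp [pvStepA, hx, max_eq_left hr]
        rw [List.foldl_cons, hstep, pvAltGo]
        simp only [hx, ne_eq, not_false_eq_true, if_true]
        exact ih xs (by simp at hlen; omega) r hr

-- ===== VERDICT (by name: the statement is the Claim_ definition above) =====
theorem max_stability_time_spec : Claim_equal_max_stability_time := by
  intro sample _
  unfold Spec_max_stability_time max_stability_time max_stability_time_alt
  exact pv_main sample.length sample le_rfl 0 le_rfl
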